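-- pv_equiv track=rewrite | github.com/ltvlx/make100 | make_100.py | make_splits
-- ===== SOURCE A (Python) =====
-- import itertools
--
-- def make_splits(number):
--     """
--     Splits a number into possible concatenations of digits.
--     Example:
--         number = '123'
--         return: [['123'], ['1', '23'], ['12', '3'], ['1', '2', '3']]
--     """
--
--     n_pos = len(number) - 1
--
--     for x in itertools.product((True, False), repeat=n_pos):
--         res = [number[0]]
--         for i in range(n_pos):
--             if x[i]:
--                 res[-1] += number[i+1]
--             else:
--                 res.append(number[i+1])
--         yield res
-- ===== SOURCE B (Python) =====
-- def make_splits(number):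
--     # Recursive peel-from-front enumeration: first chunk number[:i] for i
--     # descending, then recurse on the remainder.
--     if not number:
--         yield []
--         return
--     for i in range(len(number), 0, -1):
--         head = number[:i]
--         for rest in make_splits(number[i:]):
--             yield [head] + rest
-- ===== Notes on version B (the rewrite author's own statement) =====
-- stated objective: alternative
-- what changed: B replaces A's bitmask enumeration (itertools.product over join/split booleans plus an accumulator loop) by a recursive generator that peels the first chunk off the front with descending length and recurses on the suffix.
-- crash fix: On the empty string A raises ValueError (itertools.product with repeat=-1) while B yields the single empty split [[]]. — e.g. on make_splits(""): A raises ValueError, B returns [[]]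
import Mathlib
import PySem

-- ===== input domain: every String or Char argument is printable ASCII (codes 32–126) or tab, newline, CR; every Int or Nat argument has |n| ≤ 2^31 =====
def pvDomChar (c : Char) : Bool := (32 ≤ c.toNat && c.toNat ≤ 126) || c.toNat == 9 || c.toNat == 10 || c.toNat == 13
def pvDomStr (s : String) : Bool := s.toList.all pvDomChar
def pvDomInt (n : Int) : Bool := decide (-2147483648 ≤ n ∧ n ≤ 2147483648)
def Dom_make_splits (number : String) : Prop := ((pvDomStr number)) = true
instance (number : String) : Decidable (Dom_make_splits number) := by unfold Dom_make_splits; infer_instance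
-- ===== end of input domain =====

-- B replaces A's boolean-bitmask enumeration by a recursive peel-first-chunk
-- generator (objective: alternative decomposition, same cost).
-- Both ports work over List Char internally and wrap pieces with String.mk at
-- the end; this is exact, and avoids opaque String primitives in proofs.

-- ===== PORT A =====
-- itertools.product((True, False), repeat=n): all Bool tuples, True first,
-- rightmost position varying fastest (exact transliteration of product's order).
def pyProductBools : Nat → List (List Bool)
  | 0 => [[]]
  | n + 1 => (pyProductBools n).map (true :: ·) ++ (pyProductBools n).map (false :: ·)

-- res[-1] += d  (A's list is always nonempty; on [] Python would IndexError,
-- unreachable here since res starts nonempty and only grows)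
def appendLast : List (List Char) → Char → List (List Char)
  | [], _ => []
  | [s], d => [s ++ [d]]
  | s :: ss, d => s :: appendLast ss d

-- A's inner loop: for i in range(n_pos): if x[i]: res[-1] += number[i+1] else: res.append(number[i+1])
def loopCore : List (List Char) → List (Bool × Char) → List (List Char)
  | res, [] => res
  | res, (b, d) :: rest =>
      if b then loopCore (appendLast res d) rest
      else loopCore (res ++ [[d]]) rest

def make_splits (number : String) : List (List String) :=
  match number.toList with
  | [] => []  -- A raises ValueError here (repeat=-1); excluded by Pre_
  | c :: cs =>
      (pyProductBools cs.length).map (fun x =>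
        (loopCore [[c]] (x.zip cs)).map String.mk)

-- ===== PORT B =====
-- B's recursion is on suffixes (not structural); fuel = length makes it a
-- structural transliteration. 'for i in range(len,0,-1)' is indexed here by
-- j = 0..len-1 with first-chunk length i = len - j (same order, same chunks);
-- on c :: cs we write i = k+1 with k = cs.length - j.
def altCoreF : Nat → List Char → List (List (List Char))
  | _, [] => [[]]
  | 0, _ :: _ => []  -- unreachable with fuel = length
  | fuel + 1, c :: cs =>
      (List.range (cs.length + 1)).flatMap (fun j =>
        (altCoreF fuel (cs.drop (cs.length - j))).map
          (fun rest => (c :: cs.take (cs.length - j)) :: rest))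

def make_splits_alt (number : String) : List (List String) :=
  (altCoreF number.toList.length number.toList).map (fun p => p.map String.mk)

-- ===== PRECONDITION & SPEC =====
-- A raises ValueError on the empty string (itertools.product repeat=-1); only that input is excluded.
def Pre_make_splits (number : String) : Prop := number ≠ ""
instance (number : String) : Decidable (Pre_make_splits number) := by unfold Pre_make_splits; infer_instance
def pvWitness_make_splits : String := "12"

-- On the empty string A raises ValueError; B returns the single empty split [[]].
def Raises_make_splits (number : String) : Prop := number = ""
instance (number : String) : Decidable (Raises_make_splits number) := by unfold Raises_make_splits; infer_instance
def pvRaiseWitness_make_splits : String := ""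
def pvRaiseWitnessOut_make_splits : List (List String) := [[]]

def Spec_make_splits (number : String) (out : List (List String)) : Prop := out = make_splits_alt number
instance (number : String) (out : List (List String)) : Decidable (Spec_make_splits number out) := by unfold Spec_make_splits; infer_instance

-- ===== CLAIM (what is proved, stated in full; the proofs are below) =====
def Claim_equal_make_splits : Prop := ∀ (number : String), Dom_make_splits number → Pre_make_splits number → Spec_make_splits number (make_splits number)
def Claim_raises_make_splits : Prop := (∀ (number : String), Dom_make_splits number → Raises_make_splits number → ¬ Pre_make_splits number) ∧ (Dom_make_splits (pvRaiseWitness_make_splits) ∧ Raises_make_splits (pvRaiseWitness_make_splits) ∧ make_splits_alt (pvRaiseWitness_make_splits) = pvRaiseWitnessOut_make_splits)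

-- ===== LEMMAS AND PROOFS =====

lemma appendLast_append (a : List (List Char)) (r : List (List Char)) (d : Char)
    (hr : r ≠ []) : appendLast (a ++ r) d = a ++ appendLast r d := by
  induction a with
  | nil => simp
  | cons s ss ih =>
      rw [List.cons_append]
      cases h : ss ++ r with
      | nil =>
          rcases List.append_eq_nil_iff.mp h with ⟨-, h2⟩
          exact absurd h2 hr
      | cons t ts =>
          rw [show appendLast (s :: t :: ts) d = s :: appendLast (t :: ts) d from rfl,
            ← h, ih]
          rfl

lemma appendLast_ne_nil (r : List (List Char)) (d : Char) (hr : r ≠ []) :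
    appendLast r d ≠ [] := by
  cases r with
  | nil => exact absurd rfl hr
  | cons s ss => cases ss <;> simp [appendLast]

lemma loopCore_append (pairs : List (Bool × Char)) :
    ∀ (a r : List (List Char)), r ≠ [] →
      loopCore (a ++ r) pairs = a ++ loopCore r pairs := by
  induction pairs with
  | nil => intro a r _; simp [loopCore]
  | cons p rest ih =>
      intro a r hr
      obtain ⟨b, d⟩ := p
      by_cases hb : b
      · subst hb
        simp only [loopCore, appendLast_append a r d hr]
        exact ih a (appendLast r d) (appendLast_ne_nil r d hr)
      · simp only [loopCore, if_neg hb, List.append_assoc]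
        exact ih a (r ++ [[d]]) (by simp)

/-- Main invariant: enumerating boolean join/split masks over `cs` starting
from a single open chunk `s` equals peeling the first chunk (extension of `s`)
with descending length and recursing on the suffix. -/
lemma core_eq (cs : List Char) :
    ∀ (s : List Char) (fuel : Nat), cs.length ≤ fuel →
      (pyProductBools cs.length).map (fun x => loopCore [s] (x.zip cs)) =
      (List.range (cs.length + 1)).flatMap (fun j =>
        (altCoreF fuel (cs.drop (cs.length - j))).map
          (fun rest => (s ++ cs.take (cs.length - j)) :: rest)) := by
  induction cs with
  | nil =>
      intro s fuel _
      simp [pyProductBools, loopCore, List.range_succ, altCoreF]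
  | cons d cs' ih =>
      intro s fuel hfuel
      have hfuel' : cs'.length + 1 ≤ fuel := by simpa using hfuel
      have hn : cs'.length ≤ fuel := by omega
      obtain ⟨f, rfl⟩ : ∃ f, fuel = f + 1 := ⟨fuel - 1, by omega⟩
      have hf : cs'.length ≤ f := by omega
      -- split the product into true-first and false-first halves
      simp only [List.length_cons, pyProductBools, List.map_append, List.map_map]
      have htrue : ∀ x : List Bool,
          loopCore [s] (((true :: x)).zip (d :: cs')) = loopCore [s ++ [d]] (x.zip cs') := by
        intro x; simp [List.zip_cons_cons, loopCore, appendLast]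
      have hfalse : ∀ x : List Bool,
          loopCore [s] (((false :: x)).zip (d :: cs')) = s :: loopCore [[d]] (x.zip cs') := by
        intro x
        have h2 := loopCore_append (x.zip cs') [s] [[d]] (by simp)
        simpa [List.zip_cons_cons, loopCore] using h2
      have e1 : (pyProductBools cs'.length).map ((fun x => loopCore [s] (x.zip (d :: cs'))) ∘ (true :: ·)) =
          (List.range (cs'.length + 1)).flatMap (fun j =>
            (altCoreF (f + 1) (cs'.drop (cs'.length - j))).map
              (fun rest => ((s ++ [d]) ++ cs'.take (cs'.length - j)) :: rest)) := by
        have := ih (s ++ [d]) (f + 1) hn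
        simpa [Function.comp_def, htrue] using this
      have e2 : (pyProductBools cs'.length).map ((fun x => loopCore [s] (x.zip (d :: cs'))) ∘ (false :: ·)) =
          (altCoreF (f + 1) (d :: cs')).map (fun rest => s :: rest) := by
        have h3 := congrArg (List.map (fun r => s :: r)) (ih [d] f hf)
        simp only [Function.comp_def, hfalse]
        simpa [List.map_map, List.map_flatMap, Function.comp_def, altCoreF,
          List.singleton_append] using h3
      rw [e1, e2]
      -- RHS: split range (n+2) = range (n+1) ++ [n+1]
      conv_rhs => rw [List.range_succ, List.flatMap_append]
      congr 1
      · refine List.flatMap_congr (fun j hj => ?_)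
        have hj' : j < cs'.length + 1 := List.mem_range.mp hj
        have hk : cs'.length + 1 - j = (cs'.length - j) + 1 := by omega
        rw [hk]
        simp [List.drop_succ_cons, List.take_succ_cons, List.append_assoc]
      · simp

lemma make_splits_eq_alt (number : String) (h : number ≠ "") :
    make_splits number = make_splits_alt number := by
  rcases hchars : number.toList with _ | ⟨c, cs⟩
  · exact absurd (String.toList_eq_nil_iff.mp hchars) h
  · unfold make_splits make_splits_alt
    rw [hchars]
    simp only [List.length_cons, altCoreF]
    have hcore := congrArg (List.map (List.map String.mk))
      (core_eq cs [c] cs.length le_rfl)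
    simpa [List.map_map, List.map_flatMap, Function.comp, List.singleton_append]
      using hcore

-- ===== VERDICT (by name: the statement is the Claim_ definition above) =====
theorem make_splits_spec : Claim_equal_make_splits := by
  intro number _ hpre
  exact make_splits_eq_alt number hpre

theorem make_splits_raises : Claim_raises_make_splits := by
  unfold Claim_raises_make_splits
  exact ⟨fun number _ hr => by simp [Raises_make_splits] at hr; simp [Pre_make_splits, hr],
    by decide⟩

-- self-check that the raises witness really carries the two facts make_splits_raises asserts
theorem make_splits_raises_ok :
    Raises_make_splits pvRaiseWitness_make_splits ∧
    make_splits_alt pvRaiseWitness_make_splits = pvRaiseWitnessOut_make_splits := by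
  have h := make_splits_raises
  unfold Claim_raises_make_splits at h
  exact ⟨h.2.2.1, h.2.2.2⟩
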